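-- pv_equiv track=rewrite | github.com/Chris-C-at-Rectory/test.repo | vigenere.py | keystr
-- ===== SOURCE A (Python) =====
-- def keystr(p,key):
-- 	stream=[]
-- 	j=-1
-- 	for i in range(len(p)):
-- 		j=i
-- 		while j>int(len(key))-1:
-- 			j-=len(key)
--
-- 		stream.append(key[j])
-- 	return stream
-- ===== SOURCE B (Python) =====
-- def keystr(p, key):
--     if not p:
--         return []
--     q, r = divmod(len(p), len(key))
--     return list(key) * q + list(key[:r])
-- ===== Notes on version B (the rewrite author's own statement) =====
-- stated objective: faster
-- what changed: B builds the cyclic key stream in bulk with divmod and list tiling/slicing (list(key)*q + list(key[:r])) instead of A's per-character loop with an inner while-subtraction computing the index modulo by repeated subtraction.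
import Mathlib
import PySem

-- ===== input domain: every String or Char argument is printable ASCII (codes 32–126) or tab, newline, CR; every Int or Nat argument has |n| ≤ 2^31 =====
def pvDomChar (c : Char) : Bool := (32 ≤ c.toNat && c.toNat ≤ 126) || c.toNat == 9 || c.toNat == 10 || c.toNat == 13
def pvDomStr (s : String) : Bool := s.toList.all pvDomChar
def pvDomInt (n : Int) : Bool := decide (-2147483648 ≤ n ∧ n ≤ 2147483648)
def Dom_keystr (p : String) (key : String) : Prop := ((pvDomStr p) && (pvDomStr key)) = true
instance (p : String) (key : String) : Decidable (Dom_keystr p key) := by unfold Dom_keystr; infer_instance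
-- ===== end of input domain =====

-- B replaces A's per-character loop (with an inner repeated-subtraction while) by bulk tiling:
-- divmod + list(key)*q + list(key[:r]); equivalence is about the return value only (no mutation).

-- ===== PORT A =====
-- inner 'while j > len(key)-1: j -= len(key)'; fuel is only a totality guard
-- (fuel j.toNat+1 suffices whenever k ≥ 1; for k = 0 the Python loop diverges, excluded by Pre_)
def pvReduceJ : Nat → Int → Int → Int
  | 0, j, _ => j
  | f + 1, j, k => if j > k - 1 then pvReduceJ f (j - k) k else j

def keystr (p : String) (key : String) : List String :=
  (PySem.List.pyRange 0 (p.toList.length : Int) 1).foldl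
    (fun stream i =>
      let j := pvReduceJ (i.toNat + 1) i (key.toList.length : Int)
      -- key[j]: in-range under Pre_ (page is only reached when k ≥ 1); none never occurs there
      stream ++ [((PySem.Str.pyGet? key j).map (fun c => String.ofList [c])).getD ""]) []

-- ===== PORT B =====
def keystr_alt (p : String) (key : String) : List String :=
  if p.toList = [] then []
  else
    -- q, r = divmod(len(p), len(key)): both lengths are Nats and len(key) > 0 under Pre_,
    -- where Python's divmod agrees with Nat division/modulo
    (List.replicate (p.toList.length / key.toList.length)
        (key.toList.map (fun c => String.ofList [c]))).flatten
      ++ (key.toList.take (p.toList.length % key.toList.length)).map (fun c => String.ofList [c])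

-- ===== PRECONDITION & SPEC =====
-- Pre_ excludes key = "" with p ≠ "", on which A's inner while never terminates (Python hangs).
def Pre_keystr (p : String) (key : String) : Prop := key.toList ≠ [] ∨ p.toList = []
instance (p : String) (key : String) : Decidable (Pre_keystr p key) := by
  unfold Pre_keystr; infer_instance
def pvWitness_keystr : String × String := ("attack", "key")

def Spec_keystr (p : String) (key : String) (out : List String) : Prop := out = keystr_alt p key
instance (p : String) (key : String) (out : List String) : Decidable (Spec_keystr p key out) := by
  unfold Spec_keystr; infer_instance

-- ===== CLAIM (what is proved, stated in full; the proofs are below) =====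
def Claim_equal_keystr : Prop := ∀ (p : String) (key : String), Dom_keystr p key → Pre_keystr p key → Spec_keystr p key (keystr p key)

-- ===== LEMMAS AND PROOFS =====

-- the inner while computes j % k (for k ≥ 1, 0 ≤ j, enough fuel)
lemma pvReduceJ_eq_mod (f : Nat) : ∀ (j k : Int), 1 ≤ k → 0 ≤ j → j.toNat < f →
    pvReduceJ f j k = j % k := by
  induction f with
  | zero => intro j k _ _ h; omega
  | succ f ih =>
    intro j k hk hj hf
    simp only [pvReduceJ]
    split_ifs with h
    · rw [ih (j - k) k hk (by omega) (by omega), Int.sub_emod_right]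
    · rw [Int.emod_eq_of_lt hj (by omega)]

-- map over an initial segment of indices is take
lemma map_getD_range_take (cl : List String) : ∀ n, n ≤ cl.length →
    (List.range n).map (fun i => cl.getD i "") = cl.take n := by
  intro n
  induction n with
  | zero => simp
  | succ m ih =>
    intro h
    rw [List.range_succ, List.map_append, ih (by omega), List.take_add_one]
    simp [List.getD, List.getElem?_eq_getElem (by omega : m < cl.length)]

-- the tiling identity: indexing cyclically over range n is q full copies plus a prefix of r
lemma tile (cl : List String) (hk : 0 < cl.length) : ∀ n,
    (List.range n).map (fun i => cl.getD (i % cl.length) "") =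
      (List.replicate (n / cl.length) cl).flatten ++ cl.take (n % cl.length) := by
  intro n
  induction n using Nat.strong_induction_on with
  | _ n ih =>
    by_cases h : n < cl.length
    · rw [Nat.div_eq_of_lt h, Nat.mod_eq_of_lt h]
      simp only [List.replicate_zero, List.flatten_nil, List.nil_append]
      rw [← map_getD_range_take cl n (by omega)]
      apply List.map_congr_left
      intro i hi
      rw [Nat.mod_eq_of_lt (by rw [List.mem_range] at hi; omega)]
    · have hm : n = cl.length + (n - cl.length) := by omega
      set m := n - cl.length with hmdef
      rw [hm, List.range_add, List.map_append, List.map_map]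
      have h1 : (List.range cl.length).map (fun i => cl.getD (i % cl.length) "") = cl := by
        have e : (List.range cl.length).map (fun i => cl.getD (i % cl.length) "") =
            (List.range cl.length).map (fun i => cl.getD i "") :=
          List.map_congr_left (fun i hi => by rw [Nat.mod_eq_of_lt (List.mem_range.mp hi)])
        rw [e, map_getD_range_take cl cl.length le_rfl, List.take_length]
      have h2 : ((fun i => cl.getD (i % cl.length) "") ∘ (cl.length + ·)) =
          (fun i => cl.getD (i % cl.length) "") := by
        funext i
        simp [Nat.add_mod_left]
      rw [h1, h2, ih m (by omega)]
      have hdiv : (cl.length + m) / cl.length = m / cl.length + 1 := by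
        rw [Nat.add_comm, Nat.add_div_right _ hk]
      have hmod : (cl.length + m) % cl.length = m % cl.length := by
        rw [Nat.add_comm, Nat.add_mod_right]
      rw [hdiv, hmod, List.replicate_succ, List.flatten_cons, List.append_assoc]

-- A as a map of cyclic lookups (k ≥ 1)
lemma keystr_eq_map (p key : String) (hk : key.toList ≠ []) :
    keystr p key = (List.range p.toList.length).map
      (fun i => (key.toList.map (fun c => String.ofList [c])).getD (i % key.toList.length) "") := by
  have hk' : 0 < key.toList.length := List.length_pos_of_ne_nil hk
  unfold keystr
  rw [PySem.List.pyRange_zero_natCast, List.foldl_map,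
      PySem.List.foldl_append_singleton_eq_map]
  apply List.map_congr_left
  intro i hi
  rw [List.mem_range] at hi
  have hred : pvReduceJ ((i : Int).toNat + 1) (i : Int) (key.toList.length : Int)
      = ((i % key.toList.length : Nat) : Int) := by
    rw [pvReduceJ_eq_mod _ _ _ (by omega) (by omega) (by simp), ← Int.natCast_mod]
  rw [hred, PySem.Str.pyGet?_natCast, List.getD_eq_getElem?_getD, List.getElem?_map]

-- ===== VERDICT (by name: the statement is the Claim_ definition above) =====
theorem keystr_spec : Claim_equal_keystr := by
  intro p key _ hpre
  unfold Spec_keystr keystr_alt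
  by_cases hp : p.toList = []
  · simp only [hp]
    unfold keystr
    rw [hp]
    simp
  · have hk : key.toList ≠ [] := by
      rcases hpre with h | h
      · exact h
      · exact absurd h hp
    have hk' : 0 < key.toList.length := List.length_pos_of_ne_nil hk
    rw [if_neg hp, keystr_eq_map p key hk]
    have hlen : (key.toList.map (fun c => String.ofList [c])).length = key.toList.length := by
      simp
    have := tile (key.toList.map (fun c => String.ofList [c])) (by omega) p.toList.length
    rw [hlen] at this
    rw [this, List.map_take]
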